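-- pv_equiv track=rewrite | github.com/Secrettestbot/Super-board-game-game | games/gin_rummy.py | _find_all_melds
-- ===== SOURCE A (Python) =====
-- from itertools import combinations
--
-- RANKS = ['A', '2', '3', '4', '5', '6', '7', '8', '9', '10', 'J', 'Q', 'K']
--
-- def rank_index(card):
--     """Return the rank index (A=0, 2=1, ..., K=12)."""
--     return RANKS.index(card[0])
--
-- def _find_all_melds(hand):
--     """Find all possible melds (sets and runs) in a hand."""
--     melds = []
--
--     # Find sets (3 or 4 cards of the same rank)
--     by_rank = {}
--     for card in hand:
--         by_rank.setdefault(card[0], []).append(card)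
--     for rank, cards in by_rank.items():
--         if len(cards) >= 3:
--             for combo in combinations(cards, 3):
--                 melds.append(list(combo))
--             if len(cards) >= 4:
--                 melds.append(list(cards[:4]))
--
--     # Find runs (3+ consecutive cards of the same suit)
--     by_suit = {}
--     for card in hand:
--         by_suit.setdefault(card[1], []).append(card)
--     for suit, cards in by_suit.items():
--         sorted_cards = sorted(cards, key=rank_index)
--         indices = [rank_index(c) for c in sorted_cards]
--         # Find all runs of length 3+
--         for start in range(len(sorted_cards)):
--             run = [sorted_cards[start]]
--             for j in range(start + 1, len(sorted_cards)):
--                 if indices[j] == indices[j - 1] + 1: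
--                     run.append(sorted_cards[j])
--                     if len(run) >= 3:
--                         melds.append(list(run))
--                 else:
--                     break
--
--     return melds
-- ===== SOURCE B (Python) =====
-- from itertools import combinations
--
-- RANKS = ['A', '2', '3', '4', '5', '6', '7', '8', '9', '10', 'J', 'Q', 'K']
--
-- def _find_all_melds(hand):
--     """Find all possible melds (sets and runs) in a hand.
--
--     Same result as the original, but groups in one pass and enumerates runs by
--     splitting each sorted suit into maximal consecutive segments, then emitting
--     every contiguous window of length >= 3 of each segment.
--     """
--     by_rank = {}
--     by_suit = {}
--     for card in hand:
--         by_rank.setdefault(card[0], []).append(card)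
--         by_suit.setdefault(card[1], []).append(card)
--
--     melds = []
--
--     # Sets: all 3-card combinations of a rank group, plus the 4-card meld.
--     for cards in by_rank.values():
--         for combo in combinations(cards, 3):
--             melds.append(list(combo))
--         if len(cards) >= 4:
--             melds.append(cards[:4])
--
--     # Runs: split each suit (sorted by rank) into maximal consecutive segments,
--     # then emit all windows of length 3..L of each segment.
--     for cards in by_suit.values():
--         s = sorted(cards, key=lambda c: RANKS.index(c[0]))
--         segments = []
--         cur = []
--         prev = None
--         for c in s:
--             i = RANKS.index(c[0])
--             if cur and i == prev + 1:
--                 cur.append(c)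
--             else:
--                 if cur:
--                     segments.append(cur)
--                 cur = [c]
--             prev = i
--         if cur:
--             segments.append(cur)
--         for seg in segments:
--             L = len(seg)
--             for a in range(L):
--                 for ln in range(3, L - a + 1):
--                     melds.append(seg[a:a + ln])
--
--     return melds
-- ===== Notes on version B (the rewrite author's own statement) =====
-- stated objective: simpler
-- what changed: B groups the hand by rank and suit in one pass and replaces A's per-start rescan of each sorted suit by a single split into maximal consecutive segments followed by emitting every length>=3 window of each segment; the set enumeration is kept.
import Mathlib
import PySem

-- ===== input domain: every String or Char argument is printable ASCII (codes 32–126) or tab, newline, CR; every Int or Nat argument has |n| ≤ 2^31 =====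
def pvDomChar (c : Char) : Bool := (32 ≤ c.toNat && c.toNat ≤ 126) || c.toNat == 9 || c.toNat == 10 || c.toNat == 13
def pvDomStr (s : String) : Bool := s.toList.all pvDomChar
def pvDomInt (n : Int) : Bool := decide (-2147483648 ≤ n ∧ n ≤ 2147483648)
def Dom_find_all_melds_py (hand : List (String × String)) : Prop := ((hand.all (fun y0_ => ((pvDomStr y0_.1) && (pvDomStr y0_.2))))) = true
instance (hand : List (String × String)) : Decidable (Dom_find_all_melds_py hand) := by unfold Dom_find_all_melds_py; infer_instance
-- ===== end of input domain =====

-- B regroups the hand in one pass and enumerates runs by splitting each sorted suit into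
-- maximal consecutive segments and emitting their windows (objective: simpler; same cost).

-- ===== PORT A =====
-- RANKS
def pvRanks : List String := ["A", "2", "3", "4", "5", "6", "7", "8", "9", "10", "J", "Q", "K"]

-- rank_index(card) = RANKS.index(card[0]); total form of list.index, used only under
-- Pre_ (card[0] ∈ RANKS), where Python's .index returns this very index.
def rankIndexP (card : String × String) : Nat := (PySem.List.index? pvRanks card.1).getD 0

-- itertools.combinations(xs, 2) / (xs, 3), in Python's emission order
def comb2 {α : Type} : List α → List (List α)
  | [] => []
  | x :: xs => xs.map (fun y => [x, y]) ++ comb2 xs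

def comb3 {α : Type} : List α → List (List α)
  | [] => []
  | x :: xs => (comb2 xs).map (fun c => x :: c) ++ comb3 xs

-- A's inner 'for j in range(start+1, …)' loop: structural recursion over the remaining
-- (card, index) pairs of the zipped sorted list, carrying prev = indices[j-1]; exact,
-- since indices = sorted_cards.map rank_index and the loop breaks at the first gap.
def goA (ps : List ((String × String) × Nat)) (prev : Nat) (run : List (String × String)) :
    List (List (String × String)) :=
  match ps with
  | [] => []
  | (c, i) :: rest =>
    if i = prev + 1 then
      let run' := run ++ [c]
      (if 3 ≤ run'.length then [run'] else []) ++ goA rest i run'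
    else []

-- A's outer 'for start in range(len(sorted_cards))' loop over the zipped sorted list
def startsA : List ((String × String) × Nat) → List (List (String × String))
  | [] => []
  | (c, i) :: rest => goA rest i [c] ++ startsA rest

def find_all_melds_py (hand : List (String × String)) : List (List (String × String)) :=
  -- by_rank.setdefault(card[0], []).append(card)  =  d[k] = d.get(k, []) + [card]
  let by_rank : PySem.Dict String (List (String × String)) :=
    hand.foldl (fun d c => d.modify c.1 [] (fun l => l ++ [c])) PySem.Dict.empty
  let melds1 :=
    by_rank.items.foldl (fun acc kv =>
      let cards := kv.2
      if 3 ≤ cards.length then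
        acc ++ comb3 cards ++ (if 4 ≤ cards.length then [cards.take 4] else [])
      else acc) []
  let by_suit : PySem.Dict String (List (String × String)) :=
    hand.foldl (fun d c => d.modify c.2 [] (fun l => l ++ [c])) PySem.Dict.empty
  by_suit.items.foldl (fun acc kv =>
    let s := PySem.List.sorted kv.2 rankIndexP false
    acc ++ startsA (s.zip (s.map rankIndexP))) melds1

-- ===== PORT B =====
-- Source B's segment-splitting loop: cur is the segment under construction, prev its last
-- rank index; a gap (or duplicate rank) closes the segment.
def segGo (ps : List ((String × String) × Nat)) (cur : List (String × String)) (prev : Nat) :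
    List (List (String × String)) :=
  match ps with
  | [] => [cur]
  | (c, i) :: rest =>
    if i = prev + 1 then segGo rest (cur ++ [c]) i else cur :: segGo rest [c] i

def segmentsB : List ((String × String) × Nat) → List (List (String × String))
  | [] => []
  | (c, i) :: rest => segGo rest [c] i

-- all windows seg[a:a+ln], a ascending then ln in range(3, L-a+1); seg[a:a+ln] with
-- 0 ≤ a, 0 ≤ ln is exactly (seg.drop a).take ln, and range(3, m) is List.range' 3 (m-3)
def windowsB (seg : List (String × String)) : List (List (String × String)) :=
  (List.range seg.length).flatMap (fun a =>
    (List.range' 3 (seg.length - a + 1 - 3)).map (fun ln => (seg.drop a).take ln))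

def find_all_melds_py_alt (hand : List (String × String)) : List (List (String × String)) :=
  let grouped :
      PySem.Dict String (List (String × String)) × PySem.Dict String (List (String × String)) :=
    hand.foldl (fun p c => (p.1.modify c.1 [] (fun l => l ++ [c]),
                            p.2.modify c.2 [] (fun l => l ++ [c])))
      (PySem.Dict.empty, PySem.Dict.empty)
  let melds1 :=
    grouped.1.values.foldl (fun acc cards =>
      acc ++ comb3 cards ++ (if 4 ≤ cards.length then [cards.take 4] else [])) []
  grouped.2.values.foldl (fun acc cards =>
    let s := PySem.List.sorted cards rankIndexP false
    acc ++ (segmentsB (s.zip (s.map rankIndexP))).flatMap windowsB) melds1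

-- ===== PRECONDITION & SPEC =====
-- Pre_ excludes exactly the hands containing a card whose rank is not in RANKS: there
-- Python's RANKS.index raises ValueError (in both A and B), so A returns on no such input.
def Pre_find_all_melds_py (hand : List (String × String)) : Prop :=
  ∀ c ∈ hand, c.1 ∈ pvRanks
instance (hand : List (String × String)) : Decidable (Pre_find_all_melds_py hand) := by
  unfold Pre_find_all_melds_py; infer_instance

def pvWitness_find_all_melds_py : (List (String × String)) :=
  [("A", "S"), ("2", "S"), ("3", "S"), ("3", "H"), ("3", "D")]

def Spec_find_all_melds_py (hand : List (String × String)) (out : List (List (String × String))) : Prop := out = find_all_melds_py_alt hand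
instance (hand : List (String × String)) (out : List (List (String × String))) : Decidable (Spec_find_all_melds_py hand out) := by unfold Spec_find_all_melds_py; infer_instance

-- ===== CLAIM (what is proved, stated in full; the proofs are below) =====
def Claim_equal_find_all_melds_py : Prop := ∀ (hand : List (String × String)), Dom_find_all_melds_py hand → Pre_find_all_melds_py hand → Spec_find_all_melds_py hand (find_all_melds_py hand)

-- ===== LEMMAS AND PROOFS =====

-- emit run ++ (every nonempty prefix of cs) whose total length reaches 3: what goA
-- produces while walking a consecutive segment
def prefixEmits (run : List (String × String)) : List (String × String) → List (List (String × String))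
  | [] => []
  | c :: cs =>
    (if 3 ≤ (run ++ [c]).length then [run ++ [c]] else []) ++ prefixEmits (run ++ [c]) cs

lemma comb3_short {α : Type} (xs : List α) (h : xs.length < 3) : comb3 xs = [] := by
  match xs, h with
  | [], _ => rfl
  | [x], _ => simp [comb3, comb2]
  | [x, y], _ => simp [comb3, comb2]

-- goA along a chain of consecutive indices, with a breaking (or empty) tail
lemma goA_chain (curZ : List ((String × String) × Nat)) :
    ∀ (prev : Nat) (run : List (String × String)) (ps : List ((String × String) × Nat)),
    curZ.map Prod.snd = List.range' (prev + 1) curZ.length →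
    (∀ p ∈ ps.head?, p.2 ≠ prev + curZ.length + 1) →
    goA (curZ ++ ps) prev run = prefixEmits run (curZ.map Prod.fst) := by
  induction curZ with
  | nil =>
    intro prev run ps _ hb
    cases ps with
    | nil => rfl
    | cons p rest =>
      obtain ⟨c, i⟩ := p
      have hne : i ≠ prev + 1 := by
        have := hb (c, i) (by simp)
        simpa using this
      simp [goA, prefixEmits, hne]
  | cons p curZ' ih =>
    intro prev run ps hc hb
    obtain ⟨c0, i0⟩ := p
    simp only [List.map_cons, List.length_cons, List.range'_succ, List.cons.injEq] at hc
    obtain ⟨h0, h1⟩ := hc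
    simp only [List.cons_append, goA, if_pos h0, List.map_cons, prefixEmits]
    congr 1
    have hb' : ∀ q ∈ ps.head?, q.2 ≠ i0 + curZ'.length + 1 := by
      intro q hq
      have := hb q hq
      simp only [List.length_cons] at this
      omega
    have hc' : curZ'.map Prod.snd = List.range' (i0 + 1) curZ'.length := by
      rw [h1]; congr 1; omega
    exact ih i0 (run ++ [c0]) ps hc' hb'

lemma prefixEmits_long (cs : List (String × String)) :
    ∀ (run : List (String × String)), 2 ≤ run.length →
    prefixEmits run cs =
      (List.range' (run.length + 1) cs.length).map (fun ln => run ++ cs.take (ln - run.length)) := by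
  induction cs with
  | nil => intro run h; simp [prefixEmits]
  | cons c cs' ih =>
    intro run h
    have hif : 3 ≤ (run ++ [c]).length := by simp; omega
    simp only [prefixEmits, if_pos hif]
    rw [ih (run ++ [c]) (by simp; omega)]
    simp only [List.length_append, List.length_cons, List.length_nil, Nat.zero_add,
      List.range'_succ, List.map_cons, List.singleton_append]
    congr 1
    · simp
    · apply List.map_congr_left
      intro ln hln
      have hln' := List.mem_range'_1.mp hln
      obtain ⟨k, hk⟩ : ∃ k, ln - run.length = k + 2 := ⟨ln - run.length - 2, by omega⟩
      have hk1 : ln - (run.length + 1) = k + 1 := by omega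
      rw [hk, hk1]
      simp [List.take_succ_cons, List.append_assoc]

lemma prefixEmits_one (c : String × String) (cs : List (String × String)) :
    prefixEmits [c] cs =
      (List.range' 3 (cs.length + 2 - 3)).map (fun ln => (c :: cs).take ln) := by
  cases cs with
  | nil => simp [prefixEmits]
  | cons c1 cs' =>
    have h1 : prefixEmits [c] (c1 :: cs') = prefixEmits [c, c1] cs' := by
      simp [prefixEmits]
    rw [h1, prefixEmits_long cs' [c, c1] (by simp)]
    simp only [List.length_cons]
    have h2 : cs'.length + 1 + 2 - 3 = cs'.length := by omega
    rw [h2]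
    apply List.map_congr_left
    intro ln hln
    have hln' := List.mem_range'_1.mp hln
    obtain ⟨k, hk⟩ : ∃ k, ln = k + 2 := ⟨ln - 2, by omega⟩
    simp [hk, List.take_succ_cons]

lemma windowsB_cons (c : String × String) (cs : List (String × String)) :
    windowsB (c :: cs) = prefixEmits [c] cs ++ windowsB cs := by
  unfold windowsB
  simp only [List.length_cons]
  rw [List.range_succ_eq_map, List.flatMap_cons, List.flatMap_map]
  congr 1
  · rw [prefixEmits_one]
    simp
  · simp only [List.flatMap_def]
    congr 1
    apply List.map_congr_left
    intro a ha
    have h1 : cs.length + 1 - (a + 1) = cs.length - a := by omega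
    simp [h1, List.drop_succ_cons]

-- startsA over a chain followed by a breaking tail splits off the chain's windows
lemma startsA_break (curZ : List ((String × String) × Nat)) :
    ∀ (i₀ : Nat) (ps : List ((String × String) × Nat)),
    curZ.map Prod.snd = List.range' i₀ curZ.length →
    (∀ p ∈ ps.head?, p.2 ≠ i₀ + curZ.length) →
    startsA (curZ ++ ps) = windowsB (curZ.map Prod.fst) ++ startsA ps := by
  induction curZ with
  | nil => intro i0 ps _ _; simp [windowsB]
  | cons p curZ' ih =>
    intro i0 ps hc hb
    obtain ⟨c0, j0⟩ := p
    simp only [List.map_cons, List.length_cons, List.range'_succ, List.cons.injEq] at hc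
    obtain ⟨h0, h1⟩ := hc
    subst h0
    simp only [List.cons_append, startsA, List.map_cons, windowsB_cons]
    rw [goA_chain curZ' j0 [c0] ps h1 (by intro q hq; have := hb q hq; simp at this ⊢; omega)]
    rw [ih (j0 + 1) ps h1 (by intro q hq; have := hb q hq; simp at this ⊢; omega)]
    simp [List.append_assoc]

lemma master (ps : List ((String × String) × Nat)) :
    ∀ (curZ : List ((String × String) × Nat)) (i₀ : Nat),
    curZ.map Prod.snd = List.range' i₀ curZ.length → curZ ≠ [] →
    startsA (curZ ++ ps) =
      (segGo ps (curZ.map Prod.fst) (i₀ + curZ.length - 1)).flatMap windowsB := by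
  induction ps with
  | nil =>
    intro curZ i0 hc _
    simp only [List.append_nil, segGo, List.flatMap_cons, List.flatMap_nil, List.append_nil]
    have := startsA_break curZ i0 [] hc (by simp)
    simpa [startsA] using this
  | cons p rest ih =>
    intro curZ i0 hc hne
    obtain ⟨c, i⟩ := p
    obtain ⟨m, hm⟩ : ∃ m, curZ.length = m + 1 := ⟨curZ.length - 1, by cases curZ <;> simp_all⟩
    simp only [segGo]
    by_cases hcase : i = i0 + curZ.length - 1 + 1
    · rw [if_pos hcase]
      have hi : i = i0 + curZ.length := by omega
      have hchain : (curZ ++ [(c, i)]).map Prod.snd = List.range' i0 (curZ ++ [(c, i)]).length := by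
        simp only [List.map_append, List.length_append, List.map_cons, List.map_nil,
          List.length_cons, List.length_nil, Nat.zero_add]
        rw [hc, hi, List.range'_1_concat]
      have := ih (curZ ++ [(c, i)]) i0 hchain (by simp)
      rw [List.append_assoc] at this
      simp only [List.cons_append, List.nil_append] at this
      rw [this]
      simp only [List.map_append, List.map_cons, List.map_nil, List.length_append,
        List.length_cons, List.length_nil]
      congr 2
      omega
    · rw [if_neg hcase]
      rw [List.flatMap_cons]
      have hb : ∀ q ∈ ((c, i) :: rest).head?, q.2 ≠ i0 + curZ.length := by
        intro q hq
        simp at hq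
        subst hq
        omega
      rw [startsA_break curZ i0 ((c, i) :: rest) hc hb]
      have := ih [(c, i)] i (by simp [List.range'_succ]) (by simp)
      simp only [List.cons_append, List.nil_append, List.map_cons, List.map_nil,
        List.length_cons, List.length_nil, Nat.add_sub_cancel] at this
      rw [this]

lemma startsA_eq_segments (zs : List ((String × String) × Nat)) :
    startsA zs = (segmentsB zs).flatMap windowsB := by
  cases zs with
  | nil => rfl
  | cons p rest =>
    obtain ⟨c, i⟩ := p
    have := master rest [(c, i)] i (by simp [List.range'_succ]) (by simp)
    simpa [segmentsB] using this

-- ===== VERDICT (by name: the statement is the Claim_ definition above) =====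
theorem find_all_melds_py_spec : Claim_equal_find_all_melds_py := by
  intro hand _ _
  unfold Spec_find_all_melds_py find_all_melds_py find_all_melds_py_alt
  rw [PySem.List.foldl_prod_mk (fun d c => PySem.Dict.modify d c.1 [] (fun l => l ++ [c]))
        (fun d c => PySem.Dict.modify d c.2 [] (fun l => l ++ [c])) hand PySem.Dict.empty PySem.Dict.empty]
  simp only [PySem.Dict.values, List.foldl_map]
  have hrank :
      (List.foldl (fun d c => PySem.Dict.modify d c.1 [] fun l => l ++ [c]) PySem.Dict.empty hand).items.foldl
        (fun acc kv =>
          if 3 ≤ kv.2.length then acc ++ comb3 kv.2 ++ (if 4 ≤ kv.2.length then [kv.2.take 4] else []) else acc) []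
      = (List.foldl (fun d c => PySem.Dict.modify d c.1 [] fun l => l ++ [c]) PySem.Dict.empty hand).items.foldl
        (fun acc kv => acc ++ comb3 kv.2 ++ (if 4 ≤ kv.2.length then [kv.2.take 4] else [])) [] := by
    apply List.foldl_ext
    intro acc kv _
    by_cases h : 3 ≤ kv.2.length
    · rw [if_pos h]
    · rw [if_neg h, comb3_short kv.2 (by omega), if_neg (by omega)]
      simp
  rw [hrank]
  exact List.foldl_ext _ _ _ (fun acc kv _ => by rw [startsA_eq_segments])
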